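-- pv_equiv track=rewrite | github.com/ElchaabiMohamed/InferCode_SVM | NC-5690-python-files/program_735.py | indiceOccurrence
-- ===== SOURCE A (Python) =====
-- def indiceOccurrence(n,x,l):
--   cpt=0
--   i=0
--   while i<len(l) and i<n:
--     if l[i]==x:
--       cpt+=1
--     i+=1
--   if cpt!=n:
--     res=None
--   else:
--     res=cpt
--   return res
-- ===== SOURCE B (Python) =====
-- def indiceOccurrence(n, x, l):
--     # Stage 1 (independent of n): length of the maximal prefix of l equal to x.
--     p = 0
--     for v in l:
--         if v != x:
--             break
--         p += 1
--     # Stage 2: pure arithmetic on n against that prefix length.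
--     return n if 0 <= n <= p else None
-- ===== Notes on version B (the rewrite author's own statement) =====
-- stated objective: alternative
-- what changed: B drops A's n-bounded counting loop and cpt==n comparison: it first computes an n-independent quantity, the maximal all-x prefix length p of l (stopping at the first mismatch), then decides the answer purely arithmetically as n if 0 <= n <= p else None. Mechanism: the prefix loop breaks at the first mismatching element and does no per-element counting/arithmetic, so it typically scans far fewer elements than A's full min(n,len(l)) counting pass.
import Mathlib
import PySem

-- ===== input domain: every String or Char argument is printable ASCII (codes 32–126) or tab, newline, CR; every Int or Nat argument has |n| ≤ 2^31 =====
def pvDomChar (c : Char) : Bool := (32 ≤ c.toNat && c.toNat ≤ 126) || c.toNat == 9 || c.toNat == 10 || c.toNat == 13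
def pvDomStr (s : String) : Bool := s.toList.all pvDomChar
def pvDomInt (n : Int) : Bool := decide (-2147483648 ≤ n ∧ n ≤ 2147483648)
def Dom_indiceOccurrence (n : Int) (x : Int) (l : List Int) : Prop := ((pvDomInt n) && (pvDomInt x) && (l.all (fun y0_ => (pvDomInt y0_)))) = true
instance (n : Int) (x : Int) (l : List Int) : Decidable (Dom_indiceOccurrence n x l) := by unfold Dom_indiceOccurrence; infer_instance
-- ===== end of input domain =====

-- B replaces A's n-bounded counting loop with a two-stage computation: the maximal
-- all-x prefix length p of l (n-independent), then the arithmetic test 0 ≤ n ≤ p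
-- (objective: alternative decomposition, same cost).


-- ===== PORT A =====
-- A's while loop: i counts up while i < len(l) and i < n; cpt counts matches.
def indiceOccurrenceLoop (n : Int) (x : Int) (l : List Int) (i : Nat) (cpt : Int) : Int :=
  if i < l.length ∧ (i : Int) < n then
    indiceOccurrenceLoop n x l (i + 1) (if l.getD i 0 = x then cpt + 1 else cpt)
  else cpt
termination_by l.length - i

def indiceOccurrence (n : Int) (x : Int) (l : List Int) : Option Int :=
  let cpt := indiceOccurrenceLoop n x l 0 0
  if cpt ≠ n then none else some cpt

-- ===== PORT B =====
-- Source B's stage-1 loop with break: length of the maximal all-x prefix of l.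
def prefixLen (x : Int) : List Int → Nat
  | [] => 0
  | v :: t => if v ≠ x then 0 else prefixLen x t + 1

def indiceOccurrence_alt (n : Int) (x : Int) (l : List Int) : Option Int :=
  if 0 ≤ n ∧ n ≤ (prefixLen x l : Int) then some n else none

-- ===== PRECONDITION & SPEC =====
def Spec_indiceOccurrence (n : Int) (x : Int) (l : List Int) (out : Option Int) : Prop := out = indiceOccurrence_alt n x l
instance (n : Int) (x : Int) (l : List Int) (out : Option Int) : Decidable (Spec_indiceOccurrence n x l out) := by unfold Spec_indiceOccurrence; infer_instance

-- ===== CLAIM (what is proved, stated in full; the proofs are below) =====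
def Claim_equal_indiceOccurrence : Prop := ∀ (n : Int) (x : Int) (l : List Int), Dom_indiceOccurrence n x l → Spec_indiceOccurrence n x l (indiceOccurrence n x l)

-- ===== LEMMAS AND PROOFS =====

-- A's loop stops exactly at stop := min l.length n.toNat; its result adds the number
-- of matching indices in [i, stop).
theorem indiceOccurrenceLoop_eq (n : Int) (x : Int) (l : List Int) :
    ∀ (i : Nat) (cpt : Int),
      indiceOccurrenceLoop n x l i cpt =
        cpt + ((List.range' i (min l.length n.toNat - i)).countP (fun j => l.getD j 0 = x) : Int) := by
  intro i cpt
  generalize hk : min l.length n.toNat - i = k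
  induction k generalizing i cpt with
  | zero =>
    rw [indiceOccurrenceLoop]
    have : ¬ (i < l.length ∧ (i : Int) < n) := by
      rintro ⟨h1, h2⟩
      have hn : 0 ≤ n := le_of_lt (lt_of_le_of_lt (Int.natCast_nonneg i) h2)
      have h2' : i < n.toNat := by omega
      omega
    simp [this, List.range']
  | succ k ih =>
    rw [indiceOccurrenceLoop]
    have hi : i < min l.length n.toNat := by omega
    have h1 : i < l.length := lt_of_lt_of_le hi (Nat.min_le_left _ _)
    have h2 : (i : Int) < n := by
      have : i < n.toNat := lt_of_lt_of_le hi (Nat.min_le_right _ _)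
      omega
    simp only [h1, h2, and_self, if_true]
    rw [ih (i + 1) _ (by omega)]
    rw [List.range'_succ, List.countP_cons]
    by_cases h : l.getD i 0 = x
    · rw [if_pos h, if_pos (decide_eq_true h)]
      push_cast; ring
    · rw [if_neg h, if_neg (by simpa using h)]
      push_cast; ring

theorem countP_le (l : List Int) (x : Int) (m : Nat) :
    (List.range m).countP (fun j => l.getD j 0 = x) ≤ m := by
  simpa using List.countP_le_length (l := List.range m) (p := fun j => l.getD j 0 = x)

theorem prefixLen_le_length (x : Int) (l : List Int) : prefixLen x l ≤ l.length := by
  induction l with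
  | nil => simp [prefixLen]
  | cons v t ih =>
    by_cases h : v ≠ x
    · simp [prefixLen, h]
    · simp [prefixLen, h]; omega

-- m ≤ prefix length ⟺ the first m elements all equal x (for m within the list).
theorem prefixLen_char (x : Int) :
    ∀ (l : List Int) (m : Nat), m ≤ l.length →
      (m ≤ prefixLen x l ↔ ∀ i < m, l.getD i 0 = x) := by
  intro l
  induction l with
  | nil =>
    intro m hm
    have hm0 : m = 0 := by simpa using hm
    simp [hm0]
  | cons v t ih =>
    intro m hm
    cases m with
    | zero => simp
    | succ m =>
      by_cases h : v = x
      · simp only [prefixLen, h, ne_eq, not_true_eq_false, if_false, Nat.succ_le_succ_iff]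
        rw [ih m (by simpa using hm)]
        constructor
        · intro hall i hi
          cases i with
          | zero => simp [h]
          | succ i => simpa using hall i (by omega)
        · intro hall i hi
          simpa using hall (i + 1) (by omega)
      · simp only [prefixLen, h, ne_eq, not_false_eq_true, if_true]
        constructor
        · omega
        · intro hall
          exact absurd (by simpa using hall 0 (by omega)) h

-- ===== VERDICT (by name: the statement is the Claim_ definition above) =====
theorem indiceOccurrence_spec : Claim_equal_indiceOccurrence := by
  intro n x l _
  unfold Spec_indiceOccurrence indiceOccurrence indiceOccurrence_alt
  have hloop := indiceOccurrenceLoop_eq n x l 0 0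
  rw [Nat.sub_zero, ← List.range_eq_range'] at hloop
  have key : ((0 : Int) + ((List.range (min l.length n.toNat)).countP
        (fun j => decide (l.getD j 0 = x)) : Int) = n) ↔
      (0 ≤ n ∧ n ≤ (prefixLen x l : Int)) := by
    constructor
    · intro h
      have hle := countP_le l x (min l.length n.toNat)
      have hlen' : min l.length n.toNat ≤ l.length := Nat.min_le_left _ _
      have hn : 0 ≤ n := by omega
      have hs : min l.length n.toNat = n.toNat := by omega
      rw [hs] at h
      refine ⟨hn, ?_⟩
      have hnl : n.toNat ≤ l.length := by omega
      have hall : ∀ i < n.toNat, l.getD i 0 = x := by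
        intro i hi
        have hlen2 : (List.range n.toNat).countP (fun j => decide (l.getD j 0 = x)) =
            (List.range n.toNat).length := by
          simp only [List.length_range]; omega
        have := List.countP_eq_length.mp hlen2 i (by simpa using hi)
        simpa using this
      have := (prefixLen_char x l n.toNat hnl).mpr hall
      omega
    · rintro ⟨hn, hp⟩
      have hpl := prefixLen_le_length x l
      have hnl : n.toNat ≤ l.length := by omega
      have hs : min l.length n.toNat = n.toNat := by omega
      rw [hs]
      have hall := (prefixLen_char x l n.toNat hnl).mp (by omega)
      have hcnt : (List.range n.toNat).countP (fun j => decide (l.getD j 0 = x)) =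
          (List.range n.toNat).length :=
        List.countP_eq_length.mpr (fun a ha => by
          simpa using hall a (by simpa using ha))
      rw [hcnt]
      simp only [List.length_range]
      omega
  rw [hloop]
  dsimp only
  split_ifs with h1 h2 h3
  · exact absurd (key.mpr h2) h1
  · rfl
  · exact congrArg some (not_not.mp h1)
  · exact absurd (key.mp (not_not.mp h1)) h3
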